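-- pv_equiv track=rewrite | github.com/zhouliupku/LGtagging_LSTM | utils.py | get_sent_len_for_pages
-- ===== SOURCE A (Python) =====
-- def get_sent_len_for_pages(tag_seq_list, eos_tag):
--     parsed_sent_len_for_pages = []
--     for tag_seq in tag_seq_list:
--         # make list of int (i.e. sentence lengths) out of list of tags
--         parsed_sent_len = []
--         current_len = 0
--         for tag in tag_seq:
--             current_len += 1
--             if tag == eos_tag:
--                 parsed_sent_len.append(current_len)
--                 current_len = 0
--         # in case last char is not tagged as 'S'
--         if current_len > 0:
--             parsed_sent_len.append(current_len)
--         parsed_sent_len_for_pages.append(parsed_sent_len)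
--     return parsed_sent_len_for_pages
-- ===== SOURCE B (Python) =====
-- def get_sent_len_for_pages(tag_seq_list, eos_tag):
--     def lens(tag_seq):
--         boundaries = [i for i, t in enumerate(tag_seq) if t == eos_tag]
--         out = []
--         prev = 0
--         for b in boundaries:
--             out.append(b + 1 - prev)
--             prev = b + 1
--         if prev < len(tag_seq):
--             out.append(len(tag_seq) - prev)
--         return out
--     return [lens(seq) for seq in tag_seq_list]
-- ===== Notes on version B (the rewrite author's own statement) =====
-- stated objective: alternative
-- what changed: B first collects the eos boundary indices per sequence and turns consecutive boundary differences into sentence lengths (plus a trailing remainder), instead of A's single running-counter accumulator loop.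
import Mathlib
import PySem

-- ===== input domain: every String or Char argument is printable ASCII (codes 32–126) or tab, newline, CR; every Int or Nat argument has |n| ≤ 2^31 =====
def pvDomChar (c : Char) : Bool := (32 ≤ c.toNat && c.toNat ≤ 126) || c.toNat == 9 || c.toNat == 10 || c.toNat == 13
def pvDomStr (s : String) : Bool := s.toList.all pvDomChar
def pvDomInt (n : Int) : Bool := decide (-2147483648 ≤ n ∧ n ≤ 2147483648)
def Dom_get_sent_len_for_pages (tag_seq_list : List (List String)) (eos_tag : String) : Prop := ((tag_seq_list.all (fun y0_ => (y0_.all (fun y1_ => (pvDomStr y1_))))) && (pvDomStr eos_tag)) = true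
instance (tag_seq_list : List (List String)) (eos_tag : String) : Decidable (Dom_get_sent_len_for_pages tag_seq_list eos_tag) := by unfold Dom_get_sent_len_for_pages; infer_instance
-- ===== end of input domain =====

-- B replaces A's running-counter accumulator loop by collecting eos boundary indices and
-- differencing them into sentence lengths (objective: alternative decomposition, same cost).

-- ===== PORT A =====
-- A-side helpers: the body of A's inner for-loop and its trailing-segment check
def pvAstep (eos_tag : String) (st : List Int × Int) (tag : String) : List Int × Int :=
  let cur := st.2 + 1
  if tag = eos_tag then (st.1 ++ [cur], 0) else (st.1, cur)

def pvAfin (s : List Int × Int) : List Int :=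
  if s.2 > 0 then s.1 ++ [s.2] else s.1

def get_sent_len_for_pages (tag_seq_list : List (List String)) (eos_tag : String) : List (List Int) :=
  tag_seq_list.foldl (fun pages tag_seq =>
    pages ++ [pvAfin (tag_seq.foldl (pvAstep eos_tag) (([] : List Int), (0 : Int)))]) []

-- ===== PORT B =====
-- B-side helpers: boundary indices, the body of B's boundary loop, and its trailing check
def pvBounds (tag_seq : List String) (eos_tag : String) (k : Int) : List Int :=
  ((PySem.List.enumerate tag_seq k).filter (fun p => p.2 = eos_tag)).map (·.1)

def pvBstep (st : List Int × Int) (b : Int) : List Int × Int :=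
  (st.1 ++ [b + 1 - st.2], b + 1)

def pvBfin (n : Int) (s : List Int × Int) : List Int :=
  if s.2 < n then s.1 ++ [n - s.2] else s.1

def pvAltLens (tag_seq : List String) (eos_tag : String) : List Int :=
  pvBfin (tag_seq.length) ((pvBounds tag_seq eos_tag 0).foldl pvBstep (([] : List Int), (0 : Int)))

def get_sent_len_for_pages_alt (tag_seq_list : List (List String)) (eos_tag : String) : List (List Int) :=
  tag_seq_list.map (fun seq => pvAltLens seq eos_tag)

-- ===== PRECONDITION & SPEC =====
def Spec_get_sent_len_for_pages (tag_seq_list : List (List String)) (eos_tag : String) (out : List (List Int)) : Prop := out = get_sent_len_for_pages_alt tag_seq_list eos_tag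
instance (tag_seq_list : List (List String)) (eos_tag : String) (out : List (List Int)) : Decidable (Spec_get_sent_len_for_pages tag_seq_list eos_tag out) := by unfold Spec_get_sent_len_for_pages; infer_instance

-- ===== CLAIM (what is proved, stated in full; the proofs are below) =====
def Claim_equal_get_sent_len_for_pages : Prop := ∀ (tag_seq_list : List (List String)) (eos_tag : String), Dom_get_sent_len_for_pages tag_seq_list eos_tag → Spec_get_sent_len_for_pages tag_seq_list eos_tag (get_sent_len_for_pages tag_seq_list eos_tag)

-- ===== LEMMAS AND PROOFS =====

-- common specification: sentence lengths of ts when the running segment already has length cur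
def pvSegs (eos_tag : String) : List String → Int → List Int
  | [], cur => if cur > 0 then [cur] else []
  | t :: ts, cur => if t = eos_tag then (cur + 1) :: pvSegs eos_tag ts 0 else pvSegs eos_tag ts (cur + 1)

theorem pvA_inner (eos_tag : String) :
    ∀ (ts : List String) (acc : List Int) (cur : Int),
    pvAfin (ts.foldl (pvAstep eos_tag) (acc, cur)) = acc ++ pvSegs eos_tag ts cur := by
  intro ts
  induction ts with
  | nil =>
      intro acc cur
      simp only [List.foldl_nil, pvAfin, pvSegs]
      split_ifs <;> simp
  | cons t ts ih =>
      intro acc cur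
      by_cases h : t = eos_tag
      · rw [List.foldl_cons, show pvAstep eos_tag (acc, cur) t = (acc ++ [cur + 1], 0) from by
          simp [pvAstep, h], ih (acc ++ [cur + 1]) 0]
        simp [pvSegs, h]
      · rw [List.foldl_cons, show pvAstep eos_tag (acc, cur) t = (acc, cur + 1) from by
          simp [pvAstep, h], ih acc (cur + 1)]
        simp [pvSegs, h]

theorem pvB_inner (eos_tag : String) :
    ∀ (ts : List String) (k prev : Int) (acc : List Int), prev ≤ k →
    pvBfin (k + (ts.length : Int)) ((pvBounds ts eos_tag k).foldl pvBstep (acc, prev))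
      = acc ++ pvSegs eos_tag ts (k - prev) := by
  intro ts
  induction ts with
  | nil =>
      intro k prev acc hle
      simp only [pvBounds, PySem.List.enumerate_nil, List.filter_nil, List.map_nil,
        List.foldl_nil, List.length_nil, pvBfin, pvSegs]
      split_ifs with h1 h2 h2 <;> simp_all; omega
  | cons t ts ih =>
      intro k prev acc hle
      have hcast : (((t :: ts).length : Nat) : Int) = (ts.length : Int) + 1 := by
        simp
      by_cases h : t = eos_tag
      · have hb : pvBounds (t :: ts) eos_tag k = k :: pvBounds ts eos_tag (k + 1) := by
          simp [pvBounds, PySem.List.enumerate_cons, h]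
        rw [hb, List.foldl_cons, show pvBstep (acc, prev) k = (acc ++ [k + 1 - prev], k + 1) from rfl,
          hcast, show k + ((ts.length : Int) + 1) = (k + 1) + (ts.length : Int) from by ring,
          ih (k + 1) (k + 1) (acc ++ [k + 1 - prev]) le_rfl]
        simp [pvSegs, h]
        ring
      · have hb : pvBounds (t :: ts) eos_tag k = pvBounds ts eos_tag (k + 1) := by
          simp [pvBounds, PySem.List.enumerate_cons, h]
        rw [hb, hcast, show k + ((ts.length : Int) + 1) = (k + 1) + (ts.length : Int) from by ring,
          ih (k + 1) prev acc (by omega),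
          show k + 1 - prev = k - prev + 1 from by ring]
        simp [pvSegs, h]

theorem pvLens_eq (ts : List String) (eos_tag : String) :
    pvAltLens ts eos_tag = pvAfin (ts.foldl (pvAstep eos_tag) (([] : List Int), (0 : Int))) := by
  rw [pvA_inner eos_tag ts [] 0]
  have := pvB_inner eos_tag ts 0 0 [] le_rfl
  simp only [sub_zero, zero_add] at this
  unfold pvAltLens
  simpa using this

theorem pv_outer (eos_tag : String) :
    ∀ (l : List (List String)) (acc : List (List Int)),
    l.foldl (fun pages tag_seq =>
      pages ++ [pvAfin (tag_seq.foldl (pvAstep eos_tag) (([] : List Int), (0 : Int)))]) acc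
      = acc ++ l.map (fun seq => pvAltLens seq eos_tag) := by
  intro l
  induction l with
  | nil => intro acc; simp
  | cons x l ih =>
      intro acc
      simp only [List.foldl_cons, List.map_cons, ih]
      rw [pvLens_eq x eos_tag]
      simp

-- ===== VERDICT (by name: the statement is the Claim_ definition above) =====
theorem get_sent_len_for_pages_spec : Claim_equal_get_sent_len_for_pages := by
  intro tsl eos _
  show get_sent_len_for_pages tsl eos = get_sent_len_for_pages_alt tsl eos
  unfold get_sent_len_for_pages get_sent_len_for_pages_alt
  simpa using pv_outer eos tsl []
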